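-- pv_equiv track=rewrite | github.com/rtnet-lyh/fap-vars | inspection_cases_bundle/inspection_cases/server/rocky/rocky_disk_raid_mdadm_check/script.py | _parse_detail_blocks
-- ===== SOURCE A (Python) =====
-- def _parse_detail_blocks(detail_text):
--     blocks = []
--     current_name = None
--     current_lines = []
--
--     for raw_line in (detail_text or '').splitlines():
--         line = raw_line.rstrip()
--         stripped = line.strip()
--         if stripped.startswith('/dev/md') and stripped.endswith(':'):
--             if current_name:
--                 blocks.append((current_name, '\n'.join(current_lines).strip()))
--             current_name = stripped[:-1]
--             current_lines = []
--             continue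
--
--         if current_name:
--             current_lines.append(line)
--
--     if current_name:
--         blocks.append((current_name, '\n'.join(current_lines).strip()))
--
--     return blocks
-- ===== SOURCE B (Python) =====
-- def _is_header(line):
--     s = line.strip()
--     return s.startswith('/dev/md') and s.endswith(':')
--
--
-- def _parse_detail_blocks(detail_text):
--     # Work through a stack of rstripped lines (top = next line), consuming
--     # header + body spans, instead of A's one-pass state machine.
--     stack = [l.rstrip() for l in (detail_text or '').splitlines()][::-1]
--     while stack and not _is_header(stack[-1]):
--         stack.pop()
--     blocks = []
--     while stack:
--         header = stack.pop()
--         body = []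
--         while stack and not _is_header(stack[-1]):
--             body.append(stack.pop())
--         blocks.append((header.strip()[:-1], '\n'.join(body).strip()))
--     return blocks
-- ===== Notes on version B (the rewrite author's own statement) =====
-- stated objective: alternative
-- what changed: Replaced A's single-pass state machine carrying (current_name, current_lines) with a stack of rstripped lines consumed span-wise: skip the pre-header prefix, then repeatedly pop a header and the run of body lines up to the next header.
import Mathlib
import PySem

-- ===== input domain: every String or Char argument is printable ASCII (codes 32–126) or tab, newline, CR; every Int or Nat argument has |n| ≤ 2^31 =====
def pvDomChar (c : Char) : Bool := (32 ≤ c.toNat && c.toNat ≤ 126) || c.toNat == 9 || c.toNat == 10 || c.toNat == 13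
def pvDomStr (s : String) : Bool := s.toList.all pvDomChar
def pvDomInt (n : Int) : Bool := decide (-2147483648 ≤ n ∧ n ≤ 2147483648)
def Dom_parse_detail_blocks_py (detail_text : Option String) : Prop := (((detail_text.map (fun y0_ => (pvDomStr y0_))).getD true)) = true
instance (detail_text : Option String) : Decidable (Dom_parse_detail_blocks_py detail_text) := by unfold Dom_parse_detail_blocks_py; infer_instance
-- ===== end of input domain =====

-- B replaces A's one-pass (current_name, current_lines) state machine by a stack of
-- rstripped lines consumed as header + body spans (objective: alternative decomposition).

-- ===== PORT A =====
-- the loop of _parse_detail_blocks: state (blocks, current_name, current_lines);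
-- current_name is Option String — it is only ever None or a name of length ≥ 7,
-- so Python's truthiness test `if current_name:` is exactly the some/none match.
def pvALoop : List String → List (String × String) → Option String → List String → List (String × String)
  | [], blocks, cn, cl =>
      match cn with
      | some n => blocks ++ [(n, PySem.Str.strip (PySem.Str.join "\n" cl))]
      | none => blocks
  | raw :: rest, blocks, cn, cl =>
      let line := PySem.Str.rstrip raw
      let stripped := PySem.Str.strip line
      if PySem.Str.startswith stripped "/dev/md" && PySem.Str.endswith stripped ":" then
        let blocks' := match cn with
          | some n => blocks ++ [(n, PySem.Str.strip (PySem.Str.join "\n" cl))]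
          | none => blocks
        pvALoop rest blocks' (some (PySem.Str.slice stripped none (some (-1)))) []
      else
        match cn with
        | some _ => pvALoop rest blocks cn (cl ++ [line])
        | none => pvALoop rest blocks cn cl

def parse_detail_blocks_py (detail_text : Option String) : List (String × String) :=
  pvALoop (PySem.Str.splitlines (detail_text.getD "")) [] none []

-- ===== PORT B =====
def pvIsHeader (line : String) : Bool :=
  let s := PySem.Str.strip line
  PySem.Str.startswith s "/dev/md" && PySem.Str.endswith s ":"

-- Source B keeps the lines on a stack (top = next line); here the stack is the list
-- with its top FIRST, so Python's stack[-1]/pop() are the head / tail.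
-- first while loop of Source B: discard lines until a header is on top
def pvSkip : List String → List String
  | [] => []
  | l :: rest => if pvIsHeader l then l :: rest else pvSkip rest

-- inner while loop of Source B: pop body lines until the next header (or empty stack)
def pvPopBody : List String → List String × List String
  | [] => ([], [])
  | l :: rest =>
      if pvIsHeader l then ([], l :: rest)
      else
        let (b, r) := pvPopBody rest
        (l :: b, r)

theorem pvPopBody_snd_length_le (xs : List String) : (pvPopBody xs).2.length ≤ xs.length := by
  induction xs with
  | nil => simp [pvPopBody]
  | cons l rest ih =>
      simp only [pvPopBody]
      split
      · simp
      · simpa using Nat.le_succ_of_le ih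

-- outer while loop of Source B
def pvBLoop : List String → List (String × String)
  | [] => []
  | h :: rest =>
      let p := pvPopBody rest
      (PySem.Str.slice (PySem.Str.strip h) none (some (-1)),
        PySem.Str.strip (PySem.Str.join "\n" p.1)) :: pvBLoop p.2
  termination_by xs => xs.length
  decreasing_by
    simpa using Nat.lt_succ_of_le (pvPopBody_snd_length_le rest)

def parse_detail_blocks_py_alt (detail_text : Option String) : List (String × String) :=
  pvBLoop (pvSkip ((PySem.Str.splitlines (detail_text.getD "")).map PySem.Str.rstrip))

-- ===== PRECONDITION & SPEC =====
def Spec_parse_detail_blocks_py (detail_text : Option String) (out : List (String × String)) : Prop := out = parse_detail_blocks_py_alt detail_text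
instance (detail_text : Option String) (out : List (String × String)) : Decidable (Spec_parse_detail_blocks_py detail_text out) := by unfold Spec_parse_detail_blocks_py; infer_instance

-- ===== CLAIM (what is proved, stated in full; the proofs are below) =====
def Claim_equal_parse_detail_blocks_py : Prop := ∀ (detail_text : Option String), Dom_parse_detail_blocks_py detail_text → Spec_parse_detail_blocks_py detail_text (parse_detail_blocks_py detail_text)

-- ===== LEMMAS AND PROOFS =====

theorem pvPopBody_eq (xs : List String) :
    pvPopBody xs = (xs.takeWhile (fun l => !pvIsHeader l), xs.dropWhile (fun l => !pvIsHeader l)) := by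
  induction xs with
  | nil => simp [pvPopBody]
  | cons l rest ih =>
      simp only [pvPopBody, List.takeWhile, List.dropWhile, ih]
      cases h : pvIsHeader l <;> simp

theorem pvSkip_eq (xs : List String) :
    pvSkip xs = xs.dropWhile (fun l => !pvIsHeader l) := by
  induction xs with
  | nil => simp [pvSkip]
  | cons l rest ih =>
      simp only [pvSkip, List.dropWhile, ih]
      cases h : pvIsHeader l <;> simp

theorem pvBLoop_cons (h : String) (rest : List String) :
    pvBLoop (h :: rest) =
      (PySem.Str.slice (PySem.Str.strip h) none (some (-1)),
        PySem.Str.strip (PySem.Str.join "\n" (rest.takeWhile (fun l => !pvIsHeader l)))) ::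
      pvBLoop (rest.dropWhile (fun l => !pvIsHeader l)) := by
  rw [pvBLoop]
  simp [pvPopBody_eq]

-- A's loop with an open block: invariant characterising it by B's span decomposition
theorem pvALoop_some (raws : List String) :
    ∀ (blocks : List (String × String)) (n : String) (cl : List String),
      pvALoop raws blocks (some n) cl =
        blocks ++ (n, PySem.Str.strip (PySem.Str.join "\n"
            (cl ++ (raws.map PySem.Str.rstrip).takeWhile (fun l => !pvIsHeader l)))) ::
          pvBLoop ((raws.map PySem.Str.rstrip).dropWhile (fun l => !pvIsHeader l)) := by
  induction raws with
  | nil => intro blocks n cl; simp [pvALoop, pvBLoop]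
  | cons raw rest ih =>
      intro blocks n cl
      simp only [pvALoop, List.map_cons]
      by_cases hh : (PySem.Str.startswith (PySem.Str.strip (PySem.Str.rstrip raw)) "/dev/md"
          && PySem.Str.endswith (PySem.Str.strip (PySem.Str.rstrip raw)) ":") = true
      · have hdr : pvIsHeader (PySem.Str.rstrip raw) = true := by
          simpa [pvIsHeader] using hh
        rw [if_pos hh, ih]
        simp [hdr, pvBLoop_cons]
      · have hdr : pvIsHeader (PySem.Str.rstrip raw) = false := by
          simpa [pvIsHeader] using hh
        rw [if_neg hh, ih]
        simp [hdr, List.append_assoc]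

theorem pvALoop_none (raws : List String) :
    ∀ (blocks : List (String × String)) (cl : List String),
      pvALoop raws blocks none cl =
        blocks ++ pvBLoop ((raws.map PySem.Str.rstrip).dropWhile (fun l => !pvIsHeader l)) := by
  induction raws with
  | nil => intro blocks cl; simp [pvALoop, pvBLoop]
  | cons raw rest ih =>
      intro blocks cl
      simp only [pvALoop, List.map_cons]
      by_cases hh : (PySem.Str.startswith (PySem.Str.strip (PySem.Str.rstrip raw)) "/dev/md"
          && PySem.Str.endswith (PySem.Str.strip (PySem.Str.rstrip raw)) ":") = true
      · have hdr : pvIsHeader (PySem.Str.rstrip raw) = true := by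
          simpa [pvIsHeader] using hh
        rw [if_pos hh, pvALoop_some]
        simp [hdr, pvBLoop_cons]
      · have hdr : pvIsHeader (PySem.Str.rstrip raw) = false := by
          simpa [pvIsHeader] using hh
        rw [if_neg hh, ih]
        simp [hdr]

-- ===== VERDICT (by name: the statement is the Claim_ definition above) =====
theorem parse_detail_blocks_py_spec : Claim_equal_parse_detail_blocks_py := by
  intro detail_text _
  unfold Spec_parse_detail_blocks_py parse_detail_blocks_py parse_detail_blocks_py_alt
  rw [pvALoop_none, pvSkip_eq]
  simp
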